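-- pv_equiv track=rewrite | github.com/freakkid/Mint | 2017年大数据处理与挖掘（暑期课程）/code/submission_combine.py | head_and_tails
-- ===== SOURCE A (Python) =====
-- def head_and_tails(word):
--     head = ['A','AB','AC','AD','AL','BE','CON','DE','DIS','IM','IN','EM','EN','FOR','PRE',
--     'PRO','TO','TRANS','MIS','RE','TANS','UN']
--     tail1 = ['AIM','AIN','CUR', 'EEM', 'DUCE','ERE','FIRM','GN','OIN','OKE','OSE','PT','RCE','SELF','UME']
--     tail2 = ['AL','ACY','AGE','ER','OR','FUL','ISM','IST','IVE','IZE','LESS','ISE','LY','NESS','SHIP','ING','ABLE','RY','TY']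
--     tail3 = ['ADE','ETTE','EE','ESE','QUE','AAR','EER','ZEE','ROO']
--     tail4 = ['IC','ION','ANA','ESCENT','ESCENCE','i','ICS','SIS','ID','INTREPID','INSIPID']
--     tail5 = ['ABLE','IBLE','ARY','ERY','ORY']
--     result = [0,0,0,0,0,0]  #result array
--     for x in head:
--         if len(x) <= len(word):
--             if word[:len(x)] == x:
--                 result[0] = 1
--     for x in tail1:
--         if len(x) <= len(word):
--             if word[-len(x):] == x:
--                 result[1] = 1
--     for x in tail2:
--         if len(x) <= len(word):
--             if word[-len(x):] == x:
--                 result[2] = 1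
--     for x in tail3:
--         if len(x) <= len(word):
--             if word[-len(x):] == x:
--                 result[3] = 1
--     for x in tail4:
--         if len(x) <= len(word):
--             if word[-len(x):] == x:
--                 result[4] = 1
--     for x in tail5:
--         if len(x) <= len(word):
--             if word[-len(x):] == x:
--                 result[5] = 1
--     return result
-- ===== SOURCE B (Python) =====
-- # B: per-group, precompute once the member set and the distinct pattern lengths; for a
-- # word, test one slice per distinct length (word[:L] head / word[-L:] tails) for set
-- # membership (stopping at the first hit), instead of comparing every pattern's slice.
--
-- HEAD = ['A','AB','AC','AD','AL','BE','CON','DE','DIS','IM','IN','EM','EN','FOR','PRE',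
--         'PRO','TO','TRANS','MIS','RE','TANS','UN']
-- TAIL1 = ['AIM','AIN','CUR','EEM','DUCE','ERE','FIRM','GN','OIN','OKE','OSE','PT','RCE','SELF','UME']
-- TAIL2 = ['AL','ACY','AGE','ER','OR','FUL','ISM','IST','IVE','IZE','LESS','ISE','LY','NESS','SHIP','ING','ABLE','RY','TY']
-- TAIL3 = ['ADE','ETTE','EE','ESE','QUE','AAR','EER','ZEE','ROO']
-- TAIL4 = ['IC','ION','ANA','ESCENT','ESCENCE','i','ICS','SIS','ID','INTREPID','INSIPID']
-- TAIL5 = ['ABLE','IBLE','ARY','ERY','ORY']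
--
-- _GROUPS = [(set(pats), sorted({len(p) for p in pats}), tail)
--            for pats, tail in ((HEAD, False), (TAIL1, True), (TAIL2, True),
--                               (TAIL3, True), (TAIL4, True), (TAIL5, True))]
--
--
-- def head_and_tails(word):
--     n = len(word)
--     out = []
--     for members, lengths, tail in _GROUPS:
--         hit = 0
--         for L in lengths:
--             if L <= n and (word[n - L:] if tail else word[:L]) in members:
--                 hit = 1
--                 break
--         out.append(hit)
--     return out
-- ===== Notes on version B (the rewrite author's own statement) =====
-- stated objective: faster
-- what changed: Instead of slicing the word once per pattern (76 slices), B precomputes per group the member set and the sorted distinct pattern lengths, and per word tests one slice per distinct length (at most 21 slices total) for set membership, stopping at the first hit.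
import Mathlib
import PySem

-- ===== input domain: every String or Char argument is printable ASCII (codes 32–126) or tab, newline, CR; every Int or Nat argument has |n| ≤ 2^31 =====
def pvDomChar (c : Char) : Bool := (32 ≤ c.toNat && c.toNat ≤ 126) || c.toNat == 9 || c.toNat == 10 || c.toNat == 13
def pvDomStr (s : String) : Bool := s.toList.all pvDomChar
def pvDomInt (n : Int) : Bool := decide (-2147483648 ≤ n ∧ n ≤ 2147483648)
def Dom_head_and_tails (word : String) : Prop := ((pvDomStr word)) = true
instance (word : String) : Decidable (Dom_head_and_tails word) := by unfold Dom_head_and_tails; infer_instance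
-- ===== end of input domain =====

-- B replaces A's per-pattern slice comparisons (76 slices per word) by, per group, one
-- slice per distinct pattern length tested against a precomputed member set.

-- the six literal pattern groups both sources spell out (A locally, B at module level)
def pvHEAD : List String := ["A","AB","AC","AD","AL","BE","CON","DE","DIS","IM","IN","EM","EN","FOR","PRE",
  "PRO","TO","TRANS","MIS","RE","TANS","UN"]
def pvTAIL1 : List String := ["AIM","AIN","CUR","EEM","DUCE","ERE","FIRM","GN","OIN","OKE","OSE","PT","RCE","SELF","UME"]
def pvTAIL2 : List String := ["AL","ACY","AGE","ER","OR","FUL","ISM","IST","IVE","IZE","LESS","ISE","LY","NESS","SHIP","ING","ABLE","RY","TY"]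
def pvTAIL3 : List String := ["ADE","ETTE","EE","ESE","QUE","AAR","EER","ZEE","ROO"]
def pvTAIL4 : List String := ["IC","ION","ANA","ESCENT","ESCENCE","i","ICS","SIS","ID","INTREPID","INSIPID"]
def pvTAIL5 : List String := ["ABLE","IBLE","ARY","ERY","ORY"]

-- ===== PORT A =====
-- A's six loops each write only their own index of `result`; the port keeps `result`
-- as six flags r0..r5 (loop i reads and writes only result[i]) and returns [r0,...,r5].
def head_and_tails (word : String) : List Int :=
  let r0 : Int := pvHEAD.foldl (fun acc x =>
    if PySem.Str.len x ≤ PySem.Str.len word then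
      if PySem.Str.slice word none (some (PySem.Str.len x)) = x then 1 else acc
    else acc) 0
  let r1 : Int := pvTAIL1.foldl (fun acc x =>
    if PySem.Str.len x ≤ PySem.Str.len word then
      if PySem.Str.slice word (some (-(PySem.Str.len x))) none = x then 1 else acc
    else acc) 0
  let r2 : Int := pvTAIL2.foldl (fun acc x =>
    if PySem.Str.len x ≤ PySem.Str.len word then
      if PySem.Str.slice word (some (-(PySem.Str.len x))) none = x then 1 else acc
    else acc) 0
  let r3 : Int := pvTAIL3.foldl (fun acc x =>
    if PySem.Str.len x ≤ PySem.Str.len word then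
      if PySem.Str.slice word (some (-(PySem.Str.len x))) none = x then 1 else acc
    else acc) 0
  let r4 : Int := pvTAIL4.foldl (fun acc x =>
    if PySem.Str.len x ≤ PySem.Str.len word then
      if PySem.Str.slice word (some (-(PySem.Str.len x))) none = x then 1 else acc
    else acc) 0
  let r5 : Int := pvTAIL5.foldl (fun acc x =>
    if PySem.Str.len x ≤ PySem.Str.len word then
      if PySem.Str.slice word (some (-(PySem.Str.len x))) none = x then 1 else acc
    else acc) 0
  [r0, r1, r2, r3, r4, r5]

-- ===== PORT B =====
-- set(pats) and sorted({len(p) for p in pats}), computed once per group (Source B's _GROUPS)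
def pvMembers (pats : List String) : PySem.Set String := PySem.Set.ofList pats
def pvLengths (pats : List String) : List Int :=
  PySem.List.sorted (PySem.Set.ofList (pats.map PySem.Str.len)) (fun L => L) false

def pvGroups : List (PySem.Set String × List Int × Bool) :=
  [(pvMembers pvHEAD, pvLengths pvHEAD, false),
   (pvMembers pvTAIL1, pvLengths pvTAIL1, true),
   (pvMembers pvTAIL2, pvLengths pvTAIL2, true),
   (pvMembers pvTAIL3, pvLengths pvTAIL3, true),
   (pvMembers pvTAIL4, pvLengths pvTAIL4, true),
   (pvMembers pvTAIL5, pvLengths pvTAIL5, true)]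

-- the inner `for L in lengths: if L <= n and <slice> in members: hit = 1; break` loop
def pvScan (word : String) (n : Int) (members : PySem.Set String) (tail : Bool) : List Int → Int
  | [] => 0
  | L :: rest =>
      if L ≤ n ∧ PySem.Set.contains members
          (if tail then PySem.Str.slice word (some (n - L)) none
           else PySem.Str.slice word none (some L)) = true
      then 1 else pvScan word n members tail rest

def head_and_tails_alt (word : String) : List Int :=
  let n := PySem.Str.len word
  pvGroups.map (fun g => pvScan word n g.1 g.2.2 g.2.1)

-- ===== PRECONDITION & SPEC =====
def Spec_head_and_tails (word : String) (out : List Int) : Prop := out = head_and_tails_alt word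
instance (word : String) (out : List Int) : Decidable (Spec_head_and_tails word out) := by unfold Spec_head_and_tails; infer_instance

-- ===== CLAIM (what is proved, stated in full; the proofs are below) =====
def Claim_equal_head_and_tails : Prop := ∀ (word : String), Dom_head_and_tails word → Spec_head_and_tails word (head_and_tails word)

-- ===== LEMMAS AND PROOFS =====

-- proof-only abbreviations for the two slice shapes (A's word[:L] / word[-L:], B's word[:L] / word[n-L:])
def pvAPiece (word : String) (tail : Bool) (L : Int) : String :=
  if tail then PySem.Str.slice word (some (-L)) none else PySem.Str.slice word none (some L)
def pvPiece (word : String) (n : Int) (tail : Bool) (L : Int) : String :=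
  if tail then PySem.Str.slice word (some (n - L)) none else PySem.Str.slice word none (some L)

lemma pvScan_eq (word : String) (n : Int) (members : PySem.Set String) (tail : Bool)
    (lengths : List Int) :
    pvScan word n members tail lengths
      = if ∃ L ∈ lengths, L ≤ n ∧ PySem.Set.contains members (pvPiece word n tail L) = true
        then 1 else 0 := by
  induction lengths with
  | nil => simp [pvScan]
  | cons L rest ih =>
      have hstep : pvScan word n members tail (L :: rest)
          = if L ≤ n ∧ PySem.Set.contains members (pvPiece word n tail L) = true
            then 1 else pvScan word n members tail rest := rfl
      rw [hstep, ih]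
      by_cases h : L ≤ n ∧ PySem.Set.contains members (pvPiece word n tail L) = true
      · rw [if_pos h, if_pos ⟨L, List.mem_cons_self, h⟩]
      · rw [if_neg h]
        refine if_congr ?_ rfl rfl
        constructor
        · rintro ⟨M, hM, hc⟩; exact ⟨M, List.mem_cons_of_mem _ hM, hc⟩
        · rintro ⟨M, hM, hc⟩
          rcases List.mem_cons.mp hM with rfl | hM'
          · exact absurd hc h
          · exact ⟨M, hM', hc⟩

lemma pvFoldl_flag (n : Int) (q : String → Prop) [DecidablePred q] (l : List String) (a : Int) :
    l.foldl (fun acc x => if PySem.Str.len x ≤ n then if q x then 1 else acc else acc) a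
      = if ∃ x ∈ l, PySem.Str.len x ≤ n ∧ q x then 1 else a := by
  induction l generalizing a with
  | nil => simp
  | cons x l ih =>
      rw [List.foldl_cons, ih]
      by_cases hex : ∃ y ∈ l, PySem.Str.len y ≤ n ∧ q y
      · rw [if_pos hex, if_pos (by obtain ⟨y, hy, h⟩ := hex; exact ⟨y, List.mem_cons_of_mem _ hy, h⟩)]
      · rw [if_neg hex]
        have hnc : ¬ (PySem.Str.len x ≤ n ∧ q x) → ¬ ∃ y ∈ x :: l, PySem.Str.len y ≤ n ∧ q y := by
          rintro hx ⟨y, hy, hc⟩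
          rcases List.mem_cons.mp hy with rfl | hy'
          · exact hx hc
          · exact hex ⟨y, hy', hc⟩
        by_cases h1 : PySem.Str.len x ≤ n
        · by_cases h2 : q x
          · rw [if_pos h1, if_pos h2, if_pos ⟨x, List.mem_cons_self, h1, h2⟩]
          · rw [if_pos h1, if_neg h2, if_neg (hnc (fun hc => h2 hc.2))]
        · rw [if_neg h1, if_neg (hnc (fun hc => h1 hc.1))]

lemma pv_piece_agree (word : String) (tail : Bool) (L : Int) (h1 : 1 ≤ L)
    (h2 : L ≤ PySem.Str.len word) :
    pvAPiece word tail L = pvPiece word (PySem.Str.len word) tail L := by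
  have hw := PySem.Str.len_eq word
  cases tail with
  | false => rfl
  | true =>
      obtain ⟨k, hk1, rfl⟩ : ∃ k : Nat, 1 ≤ k ∧ L = (k : Int) := ⟨L.toNat, by omega, by omega⟩
      unfold pvAPiece pvPiece
      rw [if_pos rfl, if_pos rfl]
      simp only [PySem.Str.slice]
      congr 1
      simp only [PySem.Chars.slice_eq_listSlice]
      rw [PySem.List.slice_from_neg_natCast word.toList k (by omega),
        PySem.List.slice_from word.toList (show (0:Int) ≤ PySem.Str.len word - (k:Int) by omega)]
      congr 1
      omega

lemma pv_len_Piece (word : String) (tail : Bool) (L : Int) (h1 : 1 ≤ L)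
    (h2 : L ≤ PySem.Str.len word) :
    PySem.Str.len (pvPiece word (PySem.Str.len word) tail L) = L := by
  have hw := PySem.Str.len_eq word
  cases tail with
  | false =>
      rw [pvPiece, if_neg Bool.false_ne_true, PySem.Str.len_eq, PySem.Str.toList_slice,
        PySem.Chars.slice_eq_listSlice,
        PySem.List.slice_to word.toList (show (0:Int) ≤ L by omega), List.length_take]
      omega
  | true =>
      rw [pvPiece, if_pos rfl, PySem.Str.len_eq, PySem.Str.toList_slice,
        PySem.Chars.slice_eq_listSlice,
        PySem.List.slice_from word.toList (show (0:Int) ≤ PySem.Str.len word - L by omega),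
        List.length_drop]
      omega

lemma pv_mem_lengths (pats : List String) (L : Int) :
    L ∈ pvLengths pats ↔ L ∈ pats.map PySem.Str.len := by
  unfold pvLengths
  rw [PySem.List.mem_sorted]
  exact PySem.Set.mem_ofList _ _

lemma pv_group_iff (word : String) (pats : List String) (tail : Bool)
    (hne : ∀ p ∈ pats, 1 ≤ PySem.Str.len p) :
    (∃ L ∈ pvLengths pats, L ≤ PySem.Str.len word ∧
        PySem.Set.contains (pvMembers pats) (pvPiece word (PySem.Str.len word) tail L) = true)
      ↔ (∃ x ∈ pats, PySem.Str.len x ≤ PySem.Str.len word ∧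
          pvAPiece word tail (PySem.Str.len x) = x) := by
  constructor
  · rintro ⟨L, hL, hLe, hc⟩
    rw [pv_mem_lengths] at hL
    obtain ⟨p, hp, hpL⟩ := List.mem_map.mp hL
    have h1 : 1 ≤ L := hpL ▸ hne p hp
    have hxmem : pvPiece word (PySem.Str.len word) tail L ∈ pats := by
      have := (PySem.Set.contains_iff (pvMembers pats) _).mp hc
      simpa [pvMembers, PySem.Set.mem_ofList] using this
    have hlen : PySem.Str.len (pvPiece word (PySem.Str.len word) tail L) = L :=
      pv_len_Piece word tail L h1 hLe
    refine ⟨pvPiece word (PySem.Str.len word) tail L, hxmem, ?_, ?_⟩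
    · rw [hlen]; exact hLe
    · rw [hlen, pv_piece_agree word tail L h1 hLe]
  · rintro ⟨x, hx, hle, heq⟩
    have h1 : 1 ≤ PySem.Str.len x := hne x hx
    refine ⟨PySem.Str.len x, ?_, hle, ?_⟩
    · rw [pv_mem_lengths]; exact List.mem_map.mpr ⟨x, hx, rfl⟩
    · rw [← pv_piece_agree word tail _ h1 hle, heq, PySem.Set.contains_iff]
      simpa [pvMembers, PySem.Set.mem_ofList] using hx

lemma pv_flag_eq_head (word : String) (pats : List String)
    (hne : ∀ p ∈ pats, 1 ≤ PySem.Str.len p) :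
    pats.foldl (fun acc x =>
        if PySem.Str.len x ≤ PySem.Str.len word then
          if PySem.Str.slice word none (some (PySem.Str.len x)) = x then 1 else acc
        else acc) (0:Int)
      = pvScan word (PySem.Str.len word) (pvMembers pats) false (pvLengths pats) := by
  rw [pvScan_eq,
    pvFoldl_flag (PySem.Str.len word) (fun x => PySem.Str.slice word none (some (PySem.Str.len x)) = x) pats 0]
  refine if_congr ?_ rfl rfl
  have h := (pv_group_iff word pats false hne).symm
  simpa [pvAPiece] using h

lemma pv_flag_eq_tail (word : String) (pats : List String)
    (hne : ∀ p ∈ pats, 1 ≤ PySem.Str.len p) :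
    pats.foldl (fun acc x =>
        if PySem.Str.len x ≤ PySem.Str.len word then
          if PySem.Str.slice word (some (-(PySem.Str.len x))) none = x then 1 else acc
        else acc) (0:Int)
      = pvScan word (PySem.Str.len word) (pvMembers pats) true (pvLengths pats) := by
  rw [pvScan_eq,
    pvFoldl_flag (PySem.Str.len word) (fun x => PySem.Str.slice word (some (-(PySem.Str.len x))) none = x) pats 0]
  refine if_congr ?_ rfl rfl
  have h := (pv_group_iff word pats true hne).symm
  simpa [pvAPiece] using h

-- ===== VERDICT (by name: the statement is the Claim_ definition above) =====
theorem head_and_tails_spec : Claim_equal_head_and_tails := by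
  intro word _
  show head_and_tails word = head_and_tails_alt word
  simp only [head_and_tails, head_and_tails_alt, pvGroups, List.map]
  rw [pv_flag_eq_head word pvHEAD (by decide),
    pv_flag_eq_tail word pvTAIL1 (by decide),
    pv_flag_eq_tail word pvTAIL2 (by decide),
    pv_flag_eq_tail word pvTAIL3 (by decide),
    pv_flag_eq_tail word pvTAIL4 (by decide),
    pv_flag_eq_tail word pvTAIL5 (by decide)]
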